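-- pv_equiv track=rewrite | github.com/inyukwo1/qgm_decoder | src/relation.py | compare_fp_relation
-- ===== SOURCE A (Python) =====
-- def compare_fp_relation(tab_ids_1, tab_ids_2, fp_relations):
--     for tab_id_1 in tab_ids_1:
--         for tab_id_2 in tab_ids_2:
--             if [tab_id_1, tab_id_2] in fp_relations or [
--                 tab_id_2,
--                 tab_id_1,
--             ] in fp_relations:
--                 return True
--     return False
-- ===== SOURCE B (Python) =====
-- def compare_fp_relation(tab_ids_1, tab_ids_2, fp_relations):
--     set1 = set(tab_ids_1)
--     set2 = set(tab_ids_2)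
--     for rel in fp_relations:
--         if isinstance(rel, list) and len(rel) == 2:
--             x, y = rel
--             if (x in set1 and y in set2) or (x in set2 and y in set1):
--                 return True
--     return False
-- ===== Notes on version B (the rewrite author's own statement) =====
-- stated objective: faster
-- what changed: Instead of scanning the id-pair product and doing a list-membership test in fp_relations for each pair, B builds membership sets for the two id lists once and makes a single pass over fp_relations, checking each length-2 relation's endpoints against the sets.
import Mathlib
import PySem

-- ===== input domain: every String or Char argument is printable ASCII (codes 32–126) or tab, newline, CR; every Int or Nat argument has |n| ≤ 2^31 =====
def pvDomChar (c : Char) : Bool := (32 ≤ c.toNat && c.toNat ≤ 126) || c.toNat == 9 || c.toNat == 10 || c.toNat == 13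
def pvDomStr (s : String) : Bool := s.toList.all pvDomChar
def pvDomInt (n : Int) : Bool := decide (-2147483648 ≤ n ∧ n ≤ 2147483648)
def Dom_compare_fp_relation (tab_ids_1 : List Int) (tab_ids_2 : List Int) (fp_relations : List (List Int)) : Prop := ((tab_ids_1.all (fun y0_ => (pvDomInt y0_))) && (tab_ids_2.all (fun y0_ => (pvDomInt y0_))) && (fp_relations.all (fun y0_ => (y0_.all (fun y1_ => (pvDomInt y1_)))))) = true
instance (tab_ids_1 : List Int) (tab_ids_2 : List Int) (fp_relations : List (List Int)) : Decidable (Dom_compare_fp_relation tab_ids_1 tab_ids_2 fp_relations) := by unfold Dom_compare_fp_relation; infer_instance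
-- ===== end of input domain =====

-- B replaces A's pair-product scan (with a list-membership test per pair) by one pass over
-- fp_relations against membership sets of the two id lists (objective: faster).

-- ===== PORT A =====
-- inner 'for tab_id_2 in tab_ids_2' loop with early return
def cfpInner (fp : List (List Int)) (a : Int) : List Int → Bool
  | [] => false
  | b :: rest =>
      if fp.contains [a, b] || fp.contains [b, a] then true else cfpInner fp a rest

-- outer 'for tab_id_1 in tab_ids_1' loop
def cfpOuter (fp : List (List Int)) (t2 : List Int) : List Int → Bool
  | [] => false
  | a :: rest => if cfpInner fp a t2 then true else cfpOuter fp t2 rest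

def compare_fp_relation (tab_ids_1 : List Int) (tab_ids_2 : List Int) (fp_relations : List (List Int)) : Bool :=
  cfpOuter fp_relations tab_ids_2 tab_ids_1

-- ===== PORT B =====
-- single pass over fp_relations; only length-2 relations are examined
def cfpScan (s1 s2 : PySem.Set Int) : List (List Int) → Bool
  | [] => false
  | rel :: rest =>
      match rel with
      | [x, y] =>
          if (PySem.Set.contains s1 x && PySem.Set.contains s2 y)
              || (PySem.Set.contains s2 x && PySem.Set.contains s1 y) then true
          else cfpScan s1 s2 rest
      | _ => cfpScan s1 s2 rest

def compare_fp_relation_alt (tab_ids_1 : List Int) (tab_ids_2 : List Int) (fp_relations : List (List Int)) : Bool :=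
  let s1 := PySem.Set.ofList tab_ids_1
  let s2 := PySem.Set.ofList tab_ids_2
  cfpScan s1 s2 fp_relations

-- ===== PRECONDITION & SPEC =====
def Spec_compare_fp_relation (tab_ids_1 : List Int) (tab_ids_2 : List Int) (fp_relations : List (List Int)) (out : Bool) : Prop := out = compare_fp_relation_alt tab_ids_1 tab_ids_2 fp_relations
instance (tab_ids_1 : List Int) (tab_ids_2 : List Int) (fp_relations : List (List Int)) (out : Bool) : Decidable (Spec_compare_fp_relation tab_ids_1 tab_ids_2 fp_relations out) := by unfold Spec_compare_fp_relation; infer_instance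

-- ===== CLAIM (what is proved, stated in full; the proofs are below) =====
def Claim_equal_compare_fp_relation : Prop := ∀ (tab_ids_1 : List Int) (tab_ids_2 : List Int) (fp_relations : List (List Int)), Dom_compare_fp_relation tab_ids_1 tab_ids_2 fp_relations → Spec_compare_fp_relation tab_ids_1 tab_ids_2 fp_relations (compare_fp_relation tab_ids_1 tab_ids_2 fp_relations)

-- ===== LEMMAS AND PROOFS =====

theorem cfpInner_iff (fp : List (List Int)) (a : Int) (t2 : List Int) :
    cfpInner fp a t2 = true ↔ ∃ b ∈ t2, [a, b] ∈ fp ∨ [b, a] ∈ fp := by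
  induction t2 with
  | nil => simp [cfpInner]
  | cons b rest ih =>
      simp only [cfpInner]
      split_ifs with h
      · simp only [List.contains_eq_mem, Bool.or_eq_true, decide_eq_true_eq] at h
        simp only [true_iff]
        exact ⟨b, List.mem_cons_self, h⟩
      · simp only [List.contains_eq_mem, Bool.or_eq_true, decide_eq_true_eq, not_or] at h
        rw [ih]
        constructor
        · rintro ⟨c, hc, hm⟩; exact ⟨c, List.mem_cons_of_mem _ hc, hm⟩
        · rintro ⟨c, hc, hm⟩
          rcases List.mem_cons.mp hc with rfl | hc'
          · exact absurd hm (by tauto)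
          · exact ⟨c, hc', hm⟩

theorem cfpOuter_iff (fp : List (List Int)) (t2 t1 : List Int) :
    cfpOuter fp t2 t1 = true ↔ ∃ a ∈ t1, ∃ b ∈ t2, [a, b] ∈ fp ∨ [b, a] ∈ fp := by
  induction t1 with
  | nil => simp [cfpOuter]
  | cons a rest ih =>
      simp only [cfpOuter]
      split_ifs with h
      · simp only [true_iff]
        exact ⟨a, List.mem_cons_self, (cfpInner_iff fp a t2).mp h⟩
      · rw [ih]
        constructor
        · rintro ⟨c, hc, hm⟩; exact ⟨c, List.mem_cons_of_mem _ hc, hm⟩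
        · rintro ⟨c, hc, hm⟩
          rcases List.mem_cons.mp hc with rfl | hc'
          · exact absurd ((cfpInner_iff fp c t2).mpr hm) (by simpa using h)
          · exact ⟨c, hc', hm⟩

theorem cfpScan_iff (s1 s2 : PySem.Set Int) (fp : List (List Int)) :
    cfpScan s1 s2 fp = true ↔
      ∃ rel ∈ fp, ∃ x y, rel = [x, y] ∧
        ((x ∈ s1 ∧ y ∈ s2) ∨ (x ∈ s2 ∧ y ∈ s1)) := by
  induction fp with
  | nil => simp [cfpScan]
  | cons rel rest ih =>
      match rel with
      | [] =>
          simp only [cfpScan, ih]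
          constructor
          · rintro ⟨c, hc, hm⟩; exact ⟨c, List.mem_cons_of_mem _ hc, hm⟩
          · rintro ⟨c, hc, x, y, hxy, hm⟩
            rcases List.mem_cons.mp hc with rfl | hc'
            · simp at hxy
            · exact ⟨c, hc', x, y, hxy, hm⟩
      | [x] =>
          simp only [cfpScan, ih]
          constructor
          · rintro ⟨c, hc, hm⟩; exact ⟨c, List.mem_cons_of_mem _ hc, hm⟩
          · rintro ⟨c, hc, u, v, hxy, hm⟩
            rcases List.mem_cons.mp hc with rfl | hc'
            · simp at hxy
            · exact ⟨c, hc', u, v, hxy, hm⟩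
      | x :: y :: z :: t =>
          simp only [cfpScan, ih]
          constructor
          · rintro ⟨c, hc, hm⟩; exact ⟨c, List.mem_cons_of_mem _ hc, hm⟩
          · rintro ⟨c, hc, u, v, hxy, hm⟩
            rcases List.mem_cons.mp hc with rfl | hc'
            · simp at hxy
            · exact ⟨c, hc', u, v, hxy, hm⟩
      | [x, y] =>
          simp only [cfpScan]
          split_ifs with h
          · simp only [Bool.or_eq_true, Bool.and_eq_true] at h
            simp only [true_iff]
            refine ⟨[x, y], List.mem_cons_self, x, y, rfl, ?_⟩
            simpa [PySem.Set.contains_iff] using h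
          · rw [ih]
            constructor
            · rintro ⟨c, hc, hm⟩; exact ⟨c, List.mem_cons_of_mem _ hc, hm⟩
            · rintro ⟨c, hc, u, v, hxy, hm⟩
              rcases List.mem_cons.mp hc with rfl | hc'
              · exfalso
                have huv : x = u ∧ y = v := by simpa using hxy
                obtain ⟨rfl, rfl⟩ := huv
                apply h
                simpa [PySem.Set.contains_iff] using hm
              · exact ⟨c, hc', u, v, hxy, hm⟩

theorem compare_fp_relation_spec : Claim_equal_compare_fp_relation := by
  intro t1 t2 fp _
  unfold Spec_compare_fp_relation compare_fp_relation compare_fp_relation_alt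
  rcases hA : cfpOuter fp t2 t1 <;> rcases hB : cfpScan (PySem.Set.ofList t1) (PySem.Set.ofList t2) fp
  · rfl
  · exfalso
    rw [cfpScan_iff] at hB
    obtain ⟨rel, hrel, x, y, rfl, hm⟩ := hB
    have : cfpOuter fp t2 t1 = true := by
      rw [cfpOuter_iff]
      rcases hm with ⟨hx, hy⟩ | ⟨hx, hy⟩
      · exact ⟨x, (PySem.Set.mem_ofList _ _).mp hx, y, (PySem.Set.mem_ofList _ _).mp hy, Or.inl hrel⟩
      · exact ⟨y, (PySem.Set.mem_ofList _ _).mp hy, x, (PySem.Set.mem_ofList _ _).mp hx, Or.inr hrel⟩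
    simp [hA] at this
  · exfalso
    rw [cfpOuter_iff] at hA
    obtain ⟨a, ha, b, hb, hm⟩ := hA
    have : cfpScan (PySem.Set.ofList t1) (PySem.Set.ofList t2) fp = true := by
      rw [cfpScan_iff]
      rcases hm with h | h
      · exact ⟨[a, b], h, a, b, rfl,
          Or.inl ⟨(PySem.Set.mem_ofList _ _).mpr ha, (PySem.Set.mem_ofList _ _).mpr hb⟩⟩
      · exact ⟨[b, a], h, b, a, rfl,
          Or.inr ⟨(PySem.Set.mem_ofList _ _).mpr hb, (PySem.Set.mem_ofList _ _).mpr ha⟩⟩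
    simp [hB] at this
  · rfl
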